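-- pv_equiv track=rewrite | github.com/DennisTurco/AppuntiLezioni | python/esercizi/speculatore.py | maxProfitVersion2
-- ===== SOURCE A (Python) =====
-- def maxProfitVersion2(azioni, prezzi):
--     # caso errore
--     if len(prezzi) <= 0: raise Exception(f"il numero dello storico dei prezzi non puo' essere {len(prezzi)} (<= 0)")
--
--     azioni_temp = azioni
--     profit = 0
--     max_profit = 0
--
--     i = 0   # -> tiene traccia del costo di quando acquisto
--     j = 0   # -> tiene traccia del valore di quando vendo
--     for repeat in range(len(prezzi)):
--         i = repeat
--         azioni = azioni_temp
--         profit = 0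
--         while i < len(prezzi):
--             j = i + 1
--             while j < len(prezzi):
--
--                 if azioni <= 0: break
--
--                 if (prezzi[j] - min(prezzi[:j]) > 0) and (azioni > 0):
--                     profit += prezzi[j] - min(prezzi[:j])
--                     i = j + 1
--                     j += 1
--                     azioni -= 1
--
--                 j += 1
--             i += 1
--
--             if profit > max_profit:
--                 max_profit = profit
--
--     return max_profit
-- ===== SOURCE B (Python) =====
-- def maxProfitVersion2(azioni, prezzi):
--     n = len(prezzi)
--     # gains[t] = prezzi[t+1] - min(prezzi[:t+1]) for t in 0..n-2
--     gains = []
--     m = prezzi[0]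
--     for p in prezzi[1:]:
--         gains.append(p - m)
--         if p < m:
--             m = p
--     best = 0
--     for r in range(n):
--         k = azioni
--         profit = 0
--         t = r  # gains index t corresponds to sell at price index t+1
--         while t < n - 1 and k > 0:
--             if gains[t] > 0:
--                 profit += gains[t]
--                 k -= 1
--                 t += 2
--             else:
--                 t += 1
--         if profit > best:
--             best = profit
--     return best
-- ===== Notes on version B (the rewrite author's own statement) =====
-- stated objective: faster
-- what changed: B precomputes a running-minimum gains list once and replaces A's re-entrant double while loop (which rescans min(prezzi[:j]) for every j and re-runs passes per start) by a single greedy scan over the gains per starting index.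
import Mathlib
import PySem

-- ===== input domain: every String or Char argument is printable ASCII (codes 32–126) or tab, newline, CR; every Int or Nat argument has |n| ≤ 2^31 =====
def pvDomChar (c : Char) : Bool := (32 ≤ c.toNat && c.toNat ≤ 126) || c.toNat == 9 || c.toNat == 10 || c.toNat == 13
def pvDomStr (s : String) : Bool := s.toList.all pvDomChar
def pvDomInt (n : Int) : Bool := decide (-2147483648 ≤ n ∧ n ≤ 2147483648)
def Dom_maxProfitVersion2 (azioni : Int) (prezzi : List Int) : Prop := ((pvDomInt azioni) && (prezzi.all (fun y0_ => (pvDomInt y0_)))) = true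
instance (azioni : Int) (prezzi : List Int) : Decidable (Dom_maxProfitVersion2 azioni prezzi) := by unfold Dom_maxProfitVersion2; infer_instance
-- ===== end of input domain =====

-- B replaces A's repeated min(prezzi[:j]) scans and re-entrant while loops by a
-- precomputed running-minimum gains list plus one greedy scan per start (alternative/faster).

-- ===== PORT A =====

-- the expression A computes twice per step: prezzi[j] - min(prezzi[:j])
def pvG (prezzi : List Int) (j : Int) : Int :=
  PySem.List.pyGetD prezzi j 0 -
    (PySem.List.min? (PySem.List.slice prezzi none (some j)) (fun y => y)).getD 0

-- inner 'while j < len(prezzi)' loop; state (azioni, profit, i); fuel only guards termination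
-- (the callers always pass enough fuel for the loop to run to completion)
def pvAInner (prezzi : List Int) : Nat → Int → Int → Int → Int → Int × Int × Int
  | 0, azioni, profit, i, _j => (azioni, profit, i)
  | fuel + 1, azioni, profit, i, j =>
    if j < (prezzi.length : Int) then
      if azioni ≤ 0 then (azioni, profit, i)
      else if pvG prezzi j > 0 ∧ azioni > 0 then
        pvAInner prezzi fuel (azioni - 1) (profit + pvG prezzi j) (j + 1) (j + 2)
      else
        pvAInner prezzi fuel azioni profit i (j + 1)
    else (azioni, profit, i)

-- middle 'while i < len(prezzi)' loop; carries (azioni, profit, max_profit, i); returns max_profit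
def pvAMid (prezzi : List Int) : Nat → Int → Int → Int → Int → Int
  | 0, _azioni, _profit, max_profit, _i => max_profit
  | fuel + 1, azioni, profit, max_profit, i =>
    if i < (prezzi.length : Int) then
      let r := pvAInner prezzi (((prezzi.length : Int) - (i + 1)).toNat + 1) azioni profit i (i + 1)
      let mp := if r.2.1 > max_profit then r.2.1 else max_profit
      pvAMid prezzi fuel r.1 r.2.1 mp (r.2.2 + 1)
    else max_profit

def maxProfitVersion2 (azioni : Int) (prezzi : List Int) : Int :=
  -- for repeat in range(len(prezzi)): i = repeat; azioni = azioni_temp; profit = 0; <middle loop>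
  (PySem.List.pyRange 0 (prezzi.length : Int) 1).foldl
    (fun max_profit repeat_ =>
      pvAMid prezzi (((prezzi.length : Int) - repeat_).toNat + 1) azioni 0 max_profit repeat_) 0

-- ===== PORT B =====

-- 'while t < n - 1 and k > 0' greedy scan over the gains list; fuel only guards termination
def pvBScan (gains : List Int) (n1 : Int) : Nat → Int → Int → Int → Int
  | 0, _k, profit, _t => profit
  | fuel + 1, k, profit, t =>
    if t < n1 ∧ k > 0 then
      if PySem.List.pyGetD gains t 0 > 0 then
        pvBScan gains n1 fuel (k - 1) (profit + PySem.List.pyGetD gains t 0) (t + 2)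
      else pvBScan gains n1 fuel k profit (t + 1)
    else profit

def maxProfitVersion2_alt (azioni : Int) (prezzi : List Int) : Int :=
  let n : Int := (prezzi.length : Int)
  let gm := prezzi.tail.foldl
    (fun (s : List Int × Int) p => (s.1 ++ [p - s.2], if p < s.2 then p else s.2))
    ([], PySem.List.pyGetD prezzi 0 0)
  let gains := gm.1
  (PySem.List.pyRange 0 n 1).foldl
    (fun best r =>
      let profit := pvBScan gains (n - 1) ((n - 1 - r).toNat + 1) azioni 0 r
      if profit > best then profit else best) 0

-- ===== PRECONDITION & SPEC =====
-- Pre_ excludes only the empty price list, on which the Python A raises an Exception.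
def Pre_maxProfitVersion2 (azioni : Int) (prezzi : List Int) : Prop := prezzi ≠ []
instance (azioni : Int) (prezzi : List Int) : Decidable (Pre_maxProfitVersion2 azioni prezzi) := by
  unfold Pre_maxProfitVersion2; infer_instance

def pvWitness_maxProfitVersion2 : Int × List Int := (2, [7, 1, 5, 3, 6, 4])

def Spec_maxProfitVersion2 (azioni : Int) (prezzi : List Int) (out : Int) : Prop := out = maxProfitVersion2_alt azioni prezzi
instance (azioni : Int) (prezzi : List Int) (out : Int) : Decidable (Spec_maxProfitVersion2 azioni prezzi out) := by unfold Spec_maxProfitVersion2; infer_instance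

-- ===== CLAIM (what is proved, stated in full; the proofs are below) =====
def Claim_equal_maxProfitVersion2 : Prop := ∀ (azioni : Int) (prezzi : List Int), Dom_maxProfitVersion2 azioni prezzi → Pre_maxProfitVersion2 azioni prezzi → Spec_maxProfitVersion2 azioni prezzi (maxProfitVersion2 azioni prezzi)

-- ===== LEMMAS AND PROOFS =====

-- abstract greedy profit: scan sell index j upward, take every positive gain, skip one index after a buy
def pvS (prezzi : List Int) (a j : Int) : Int :=
  if _h : j < (prezzi.length : Int) then
    if a ≤ 0 then 0
    else if pvG prezzi j > 0 then pvG prezzi j + pvS prezzi (a - 1) (j + 2)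
    else pvS prezzi a (j + 1)
  else 0
termination_by ((prezzi.length : Int) - j).toNat
decreasing_by all_goals omega

theorem pvS_nonneg (prezzi : List Int) (a j : Int) : 0 ≤ pvS prezzi a j := by
  fun_induction pvS prezzi a j <;> omega

-- lower bound on the returned i
theorem pvAInner_i_ge (prezzi : List Int) (fuel : Nat) (azioni profit i j : Int) :
    min i (j + 1) ≤ (pvAInner prezzi fuel azioni profit i j).2.2 := by
  induction fuel generalizing azioni profit i j with
  | zero => simp [pvAInner]
  | succ fuel ih =>
    rw [pvAInner]
    split
    · split
      · simp
      · split
        · have := ih (azioni - 1) (profit + pvG prezzi j) (j + 1) (j + 2)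
          omega
        · have := ih azioni profit i (j + 1)
          omega
    · simp

-- with enough fuel, the inner loop's profit is the abstract greedy profit
theorem pvAInner_profit (prezzi : List Int) (fuel : Nat) (azioni profit i j : Int)
    (hf : ((prezzi.length : Int) - j).toNat < fuel) :
    (pvAInner prezzi fuel azioni profit i j).2.1 = profit + pvS prezzi azioni j := by
  induction fuel generalizing azioni profit i j with
  | zero => omega
  | succ fuel ih =>
    rw [pvAInner, pvS]
    by_cases h1 : j < (prezzi.length : Int)
    · rw [if_pos h1, dif_pos h1]
      by_cases h2 : azioni ≤ 0
      · rw [if_pos h2, if_pos h2]; simp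
      · rw [if_neg h2, if_neg h2]
        by_cases h3 : pvG prezzi j > 0 ∧ azioni > 0
        · rw [if_pos h3, if_pos h3.1]
          rw [ih _ _ (j + 1) _ (by omega)]
          ring
        · have h3' : ¬ (pvG prezzi j > 0) := by
            intro hp; exact h3 ⟨hp, by omega⟩
          rw [if_neg h3, if_neg h3']
          exact ih _ _ _ _ (by omega)
    · rw [if_neg h1, dif_neg h1]; simp

-- if the shares are gone or no positive gain remains, the inner loop is a no-op (any fuel)
theorem pvAInner_noop (prezzi : List Int) (fuel : Nat) (azioni profit i j : Int)
    (h : azioni ≤ 0 ∨ ∀ t, j ≤ t → t < (prezzi.length : Int) → pvG prezzi t ≤ 0) :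
    pvAInner prezzi fuel azioni profit i j = (azioni, profit, i) := by
  induction fuel generalizing j with
  | zero => rfl
  | succ fuel ih =>
    rw [pvAInner]
    by_cases h1 : j < (prezzi.length : Int)
    · rw [if_pos h1]
      by_cases h2 : azioni ≤ 0
      · rw [if_pos h2]
      · rw [if_neg h2]
        have hg : pvG prezzi j ≤ 0 := by
          rcases h with ha | hs
          · omega
          · exact hs j (le_refl j) h1
        rw [if_neg (fun hc : pvG prezzi j > 0 ∧ azioni > 0 => by omega)]
        apply ih
        rcases h with ha | hs
        · exact Or.inl ha
        · exact Or.inr (fun t ht => hs t (by omega))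
    · rw [if_neg h1]

-- with enough fuel: after the inner loop, nothing profitable remains past the recorded buy position
theorem pvAInner_post (prezzi : List Int) (fuel : Nat) (azioni profit i j : Int)
    (hf : ((prezzi.length : Int) - j).toNat < fuel) :
    (pvAInner prezzi fuel azioni profit i j).1 ≤ 0 ∨
      ∀ t, j ≤ t → (pvAInner prezzi fuel azioni profit i j).2.2 + 2 ≤ t →
        t < (prezzi.length : Int) → pvG prezzi t ≤ 0 := by
  induction fuel generalizing azioni profit i j with
  | zero => omega
  | succ fuel ih =>
    rw [pvAInner]
    by_cases h1 : j < (prezzi.length : Int)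
    · rw [if_pos h1]
      by_cases h2 : azioni ≤ 0
      · rw [if_pos h2]; exact Or.inl h2
      · rw [if_neg h2]
        by_cases h3 : pvG prezzi j > 0 ∧ azioni > 0
        · rw [if_pos h3]
          rcases ih (azioni - 1) (profit + pvG prezzi j) (j + 1) (j + 2) (by omega) with ha | hg
          · exact Or.inl ha
          · right
            intro t ht1 ht2 ht3
            have hi := pvAInner_i_ge prezzi fuel (azioni - 1) (profit + pvG prezzi j) (j + 1) (j + 2)
            exact hg t (by omega) ht2 ht3
        · have h3' : pvG prezzi j ≤ 0 := by
            by_contra hp; exact h3 ⟨by omega, by omega⟩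
          rw [if_neg h3]
          rcases ih azioni profit i (j + 1) (by omega) with ha | hg
          · exact Or.inl ha
          · right
            intro t ht1 ht2 ht3
            rcases eq_or_lt_of_le ht1 with rfl | hlt
            · exact h3'
            · exact hg t (by omega) ht2 ht3
    · rw [if_neg h1]
      right; intro t ht1 ht2 ht3; omega

-- saturated tail of the middle loop: every further pass is a no-op (any fuel)
theorem pvAMid_tail (prezzi : List Int) (fuel : Nat) (azioni profit max_profit i : Int)
    (hsat : azioni ≤ 0 ∨ ∀ t, i + 1 ≤ t → t < (prezzi.length : Int) → pvG prezzi t ≤ 0)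
    (hle : profit ≤ max_profit) :
    pvAMid prezzi fuel azioni profit max_profit i = max_profit := by
  induction fuel generalizing i with
  | zero => rfl
  | succ fuel ih =>
    rw [pvAMid]
    by_cases h1 : i < (prezzi.length : Int)
    · rw [if_pos h1]
      have hno : pvAInner prezzi (((prezzi.length : Int) - (i + 1)).toNat + 1)
          azioni profit i (i + 1) = (azioni, profit, i) := by
        apply pvAInner_noop
        rcases hsat with ha | hs
        · exact Or.inl ha
        · exact Or.inr (fun t ht htl => hs t (by omega) htl)
      simp only [hno]
      rw [show (if profit > max_profit then profit else max_profit) = max_profit by split <;> omega]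
      apply ih (i + 1)
      rcases hsat with ha | hs
      · exact Or.inl ha
      · exact Or.inr (fun t ht htl => hs t (by omega) htl)
    · rw [if_neg h1]

-- with enough fuel, one full middle loop computes max(max_profit, greedy profit)
theorem pvAMid_eq (prezzi : List Int) (fuel : Nat) (azioni max_profit i : Int)
    (hf : ((prezzi.length : Int) - i).toNat < fuel)
    (hmp : 0 ≤ max_profit) :
    pvAMid prezzi fuel azioni 0 max_profit i = max max_profit (pvS prezzi azioni (i + 1)) := by
  cases fuel with
  | zero => omega
  | succ fuel =>
    rw [pvAMid]
    by_cases h1 : i < (prezzi.length : Int)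
    · rw [if_pos h1]
      have hprofit : (pvAInner prezzi (((prezzi.length : Int) - (i + 1)).toNat + 1)
          azioni 0 i (i + 1)).2.1 = pvS prezzi azioni (i + 1) := by
        rw [pvAInner_profit prezzi _ azioni 0 i (i + 1) (by omega)]; ring
      have hpost := pvAInner_post prezzi (((prezzi.length : Int) - (i + 1)).toNat + 1)
        azioni 0 i (i + 1) (by omega)
      have hige := pvAInner_i_ge prezzi (((prezzi.length : Int) - (i + 1)).toNat + 1)
        azioni 0 i (i + 1)
      simp only [hprofit]
      rw [pvAMid_tail]
      · split <;> omega
      · rcases hpost with ha | hgall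
        · exact Or.inl ha
        · right
          intro t ht htl
          exact hgall t (by omega) (by omega) htl
      · split <;> omega
    · rw [if_neg h1]
      rw [pvS, dif_neg (by omega)]
      omega

-- ===== B-side characterisation =====

-- structural form of Source B's gains-building loop
def pvGainsOf (l : List Int) (m : Int) : List Int :=
  match l with
  | [] => []
  | p :: l' => (p - m) :: pvGainsOf l' (min m p)

theorem pvGainsOf_fold (l : List Int) (acc : List Int) (m : Int) :
    l.foldl (fun (s : List Int × Int) p => (s.1 ++ [p - s.2], if p < s.2 then p else s.2)) (acc, m)
      = (acc ++ pvGainsOf l m, l.foldl min m) := by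
  induction l generalizing acc m with
  | nil => simp [pvGainsOf]
  | cons p l' ih =>
    simp only [List.foldl_cons, pvGainsOf]
    rw [ih]
    have : (if p < m then p else m) = min m p := by omega
    rw [this]
    simp

theorem pvGainsOf_getD (l : List Int) (m : Int) (t : Nat) (h : t < l.length) :
    (pvGainsOf l m).getD t 0 = l.getD t 0 - (l.take t).foldl min m := by
  induction t generalizing l m with
  | zero =>
    cases l with
    | nil => simp at h
    | cons p l' => simp [pvGainsOf]
  | succ t ih =>
    cases l with
    | nil => simp at h
    | cons p l' =>
      simp only [pvGainsOf, List.getD_cons_succ, List.take_succ_cons, List.foldl_cons]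
      exact ih l' (min m p) (by simpa using h)

-- the gains entry t is exactly A's gain at sell index t+1
theorem pvGains_eq_G (p0 : Int) (rest : List Int) (t : Nat) (h : t < rest.length) :
    (pvGainsOf rest p0).getD t 0 = pvG (p0 :: rest) ((t : Int) + 1) := by
  rw [pvGainsOf_getD rest p0 t h]
  simp only [pvG]
  have h1 : PySem.List.pyGetD (p0 :: rest) ((t : Int) + 1) 0 = rest.getD t 0 := by
    have : ((t : Int) + 1) = ((t + 1 : Nat) : Int) := by push_cast; ring
    rw [this, PySem.List.pyGetD_natCast]
    simp
  have h2 : PySem.List.slice (p0 :: rest) none (some ((t : Int) + 1)) = p0 :: rest.take t := by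
    have : ((t : Int) + 1) = ((t + 1 : Nat) : Int) := by push_cast; ring
    rw [this, PySem.List.slice_to_natCast]
    simp
  rw [h1, h2, PySem.List.min?_id_cons]
  simp

-- with enough fuel, Source B's scan equals the abstract greedy profit
theorem pvBScan_eq (p0 : Int) (rest : List Int) (fuel : Nat) (k profit t : Int) (ht : 0 ≤ t)
    (hf : (((p0 :: rest).length : Int) - 1 - t).toNat < fuel) :
    pvBScan (pvGainsOf rest p0) (((p0 :: rest).length : Int) - 1) fuel k profit t
      = profit + pvS (p0 :: rest) k (t + 1) := by
  induction fuel generalizing k profit t with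
  | zero => omega
  | succ fuel ih =>
    rw [pvBScan]
    by_cases h1 : t < ((p0 :: rest).length : Int) - 1 ∧ k > 0
    · rw [if_pos h1]
      have hjn : t + 1 < ((p0 :: rest).length : Int) := by omega
      have htn : t.toNat < rest.length := by simp at hjn ⊢; omega
      have hgg : PySem.List.pyGetD (pvGainsOf rest p0) t 0 = pvG (p0 :: rest) (t + 1) := by
        rw [show t = ((t.toNat : Nat) : Int) by omega, PySem.List.pyGetD_natCast]
        rw [pvGains_eq_G p0 rest t.toNat htn]
      conv_rhs => rw [pvS]
      rw [dif_pos hjn, if_neg (show ¬ k ≤ 0 by omega)]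
      by_cases h2 : PySem.List.pyGetD (pvGainsOf rest p0) t 0 > 0
      · rw [if_pos h2, if_pos (show pvG (p0 :: rest) (t + 1) > 0 by rw [← hgg]; exact h2)]
        rw [ih (k - 1) _ (t + 2) (by omega) (by omega)]
        rw [← hgg, show t + 1 + 2 = t + 2 + 1 by ring]
        ring
      · rw [if_neg h2, if_neg (show ¬ pvG (p0 :: rest) (t + 1) > 0 by rw [← hgg]; omega)]
        rw [ih k profit (t + 1) (by omega) (by omega)]
    · rw [if_neg h1]
      rw [pvS]
      by_cases hjn : t + 1 < ((p0 :: rest).length : Int)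
      · rw [dif_pos hjn, if_pos (show k ≤ 0 by omega)]
        omega
      · rw [dif_neg hjn]; omega

-- fold congruence over the repeats
theorem pvFold_eq (p0 : Int) (rest : List Int)
    (azioni : Int) (l : List Int) (hl : ∀ r ∈ l, 0 ≤ r) (mp : Int) (hmp : 0 ≤ mp) :
    l.foldl (fun max_profit repeat_ =>
        pvAMid (p0 :: rest) ((((p0 :: rest).length : Int) - repeat_).toNat + 1)
          azioni 0 max_profit repeat_) mp
      = l.foldl (fun best r =>
          let profit := pvBScan (pvGainsOf rest p0) (((p0 :: rest).length : Int) - 1)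
            ((((p0 :: rest).length : Int) - 1 - r).toNat + 1) azioni 0 r
          if profit > best then profit else best) mp := by
  induction l generalizing mp with
  | nil => rfl
  | cons r l' ih =>
    simp only [List.foldl_cons]
    have hr : 0 ≤ r := hl r (List.mem_cons_self)
    have hb : pvBScan (pvGainsOf rest p0) (((p0 :: rest).length : Int) - 1)
        ((((p0 :: rest).length : Int) - 1 - r).toNat + 1) azioni 0 r
        = pvS (p0 :: rest) azioni (r + 1) := by
      rw [pvBScan_eq p0 rest _ azioni 0 r hr (by omega)]
      ring
    have ha : pvAMid (p0 :: rest) ((((p0 :: rest).length : Int) - r).toNat + 1)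
        azioni 0 mp r = max mp (pvS (p0 :: rest) azioni (r + 1)) :=
      pvAMid_eq (p0 :: rest) _ azioni mp r (by omega) hmp
    have hnn := pvS_nonneg (p0 :: rest) azioni (r + 1)
    have hif : (if pvS (p0 :: rest) azioni (r + 1) > mp then pvS (p0 :: rest) azioni (r + 1) else mp)
        = max mp (pvS (p0 :: rest) azioni (r + 1)) := by split <;> omega
    rw [ha]
    simp only [hb, hif]
    exact ih (fun x hx => hl x (List.mem_cons_of_mem _ hx)) _ (by omega)

-- ===== VERDICT (by name: the statement is the Claim_ definition above) =====
theorem maxProfitVersion2_spec : Claim_equal_maxProfitVersion2 := by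
  unfold Claim_equal_maxProfitVersion2
  intro azioni prezzi _hdom hpre
  unfold Spec_maxProfitVersion2 maxProfitVersion2 maxProfitVersion2_alt
  cases prezzi with
  | nil => exact absurd rfl hpre
  | cons p0 rest =>
    have h0 : PySem.List.pyGetD (p0 :: rest) 0 0 = p0 := by
      rw [show (0 : Int) = ((0 : Nat) : Int) by rfl, PySem.List.pyGetD_natCast]; rfl
    simp only [List.tail_cons, h0, pvGainsOf_fold rest [] p0, List.nil_append]
    apply pvFold_eq p0 rest azioni
    · intro r hr
      have := (PySem.List.mem_pyRange_one).1 hr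
      omega
    · omega
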